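-- pv_equiv track=rewrite | github.com/letrome/linear-stats-to-notion | src/analysis_service/ticket_analysis_service.py | _bucket_tickets_per_description_status
-- ===== SOURCE A (Python) =====
-- from typing import Dict
--
-- def _bucket_tickets_per_description_status(tickets: list[Dict]) -> Dict:
--     results = {}
--     for ticket in tickets:
--         if ticket['description'] is not None and len(ticket['description']) > 0:
--             key = 'Description'
--         else:
--             key = 'No Description'
--
--         if key in results.keys():
--             results[key].append(ticket)
--         else:
--             results[key] = [ticket]
--
--     return results
-- ===== SOURCE B (Python) =====
-- def _bucket_tickets_per_description_status(tickets):
--     def bucket(ticket):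
--         if ticket['description'] is not None and len(ticket['description']) > 0:
--             return 'Description'
--         return 'No Description'
--
--     order = dict.fromkeys(bucket(t) for t in tickets)
--     return {k: [t for t in tickets if bucket(t) == k] for k in order}
-- ===== Notes on version B (the rewrite author's own statement) =====
-- stated objective: alternative
-- what changed: Replaces the loop that mutates a dict (membership test + append-or-create per ticket) with a group-by: collect the distinct bucket names in first-occurrence order via dict.fromkeys, then build the result with a dict comprehension that filters the tickets once per bucket. Pre_ excludes tickets lacking a 'description' key, where both implementations raise KeyError.
import Mathlib
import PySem

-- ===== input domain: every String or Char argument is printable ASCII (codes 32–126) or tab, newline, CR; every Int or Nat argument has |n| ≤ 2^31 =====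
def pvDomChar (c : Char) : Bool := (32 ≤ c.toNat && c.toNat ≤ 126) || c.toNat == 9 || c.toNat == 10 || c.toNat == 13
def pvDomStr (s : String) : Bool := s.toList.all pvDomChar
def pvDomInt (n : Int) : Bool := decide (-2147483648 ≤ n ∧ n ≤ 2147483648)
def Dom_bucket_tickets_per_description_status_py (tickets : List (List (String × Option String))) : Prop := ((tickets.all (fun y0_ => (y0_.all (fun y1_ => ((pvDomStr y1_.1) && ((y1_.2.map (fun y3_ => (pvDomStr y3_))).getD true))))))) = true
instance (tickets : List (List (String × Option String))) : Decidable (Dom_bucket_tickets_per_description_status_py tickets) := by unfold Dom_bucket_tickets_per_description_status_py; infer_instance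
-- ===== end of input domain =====

-- B replaces A's dict-mutating loop by a group-by (distinct bucket names, then one filter per bucket).
-- shared helper: the predicate `ticket['description'] is not None and len(ticket['description']) > 0`
-- (identical code in both Pythons); a missing 'description' key raises KeyError in both — excluded by Pre_.
def pvHasDesc (ticket : List (String × Option String)) : Bool :=
  match (PySem.Dict.mk ticket).get? "description" with
  | some (some s) => decide (0 < PySem.Str.len s)
  | _ => false

-- the bucket name chosen for a ticket (`key = 'Description' / 'No Description'` in A, `bucket(t)` in B)
def pvBucket (ticket : List (String × Option String)) : String :=
  if pvHasDesc ticket then "Description" else "No Description"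

-- ===== PORT A =====
def bucket_tickets_per_description_status_py (tickets : List (List (String × Option String))) : List (String × List (List (String × Option String))) :=
  (tickets.foldl (fun results ticket =>
      let key := pvBucket ticket
      if results.contains key then
        results.insert key (results.getD key [] ++ [ticket])
      else
        results.insert key [ticket])
    PySem.Dict.empty).items

-- ===== PORT B =====
-- dict.fromkeys(... for t in tickets) collects first occurrences in order: PySem.List.dedup
def bucket_tickets_per_description_status_py_alt (tickets : List (List (String × Option String))) : List (String × List (List (String × Option String))) :=
  (PySem.List.dedup (tickets.map pvBucket)).map
    (fun k => (k, tickets.filter (fun t => pvBucket t == k)))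

-- ===== PRECONDITION & SPEC =====
-- Pre_ excludes exactly the tickets lacking a 'description' key, where both Pythons raise KeyError.
def Pre_bucket_tickets_per_description_status_py (tickets : List (List (String × Option String))) : Prop :=
  ∀ t ∈ tickets, ((PySem.Dict.mk t).contains "description") = true
instance (tickets : List (List (String × Option String))) : Decidable (Pre_bucket_tickets_per_description_status_py tickets) := by unfold Pre_bucket_tickets_per_description_status_py; infer_instance
def pvWitness_bucket_tickets_per_description_status_py : (List (List (String × Option String))) :=
  [[("description", some "fix login")], [("description", none)], [("description", some "")]]
def Spec_bucket_tickets_per_description_status_py (tickets : List (List (String × Option String))) (out : List (String × List (List (String × Option String)))) : Prop := out = bucket_tickets_per_description_status_py_alt tickets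
instance (tickets : List (List (String × Option String))) (out : List (String × List (List (String × Option String)))) : Decidable (Spec_bucket_tickets_per_description_status_py tickets out) := by unfold Spec_bucket_tickets_per_description_status_py; infer_instance

-- ===== CLAIM (what is proved, stated in full; the proofs are below) =====
def Claim_equal_bucket_tickets_per_description_status_py : Prop := ∀ (tickets : List (List (String × Option String))), Dom_bucket_tickets_per_description_status_py tickets → Pre_bucket_tickets_per_description_status_py tickets → Spec_bucket_tickets_per_description_status_py tickets (bucket_tickets_per_description_status_py tickets)

-- ===== LEMMAS AND PROOFS =====

-- A's per-ticket step is exactly `results.modify key [] (· ++ [ticket])`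
lemma pvStep (d : PySem.Dict String (List (List (String × Option String)))) (t : List (String × Option String)) :
    (let key := pvBucket t
     if d.contains key then d.insert key (d.getD key [] ++ [t]) else d.insert key [t])
    = d.modify (pvBucket t) [] (· ++ [t]) := by
  by_cases h : d.contains (pvBucket t) = true
  · simp [h, PySem.Dict.modify]
  · have h' : d.contains (pvBucket t) = false := by simpa using h
    simp [h', PySem.Dict.modify, PySem.Dict.getD_of_not_contains d [] h']

-- the whole fold agrees with B's group-by (no precondition needed: both ports are total)
lemma pvMain (tickets : List (List (String × Option String))) :
    bucket_tickets_per_description_status_py tickets = bucket_tickets_per_description_status_py_alt tickets := by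
  unfold bucket_tickets_per_description_status_py bucket_tickets_per_description_status_py_alt
  rw [PySem.List.foldl_congr_mem tickets _
    (fun d t => d.modify (pvBucket t) [] (· ++ [t])) PySem.Dict.empty
    (fun acc x _ => pvStep acc x)]
  have hnd : (tickets.foldl (fun d t => d.modify (pvBucket t) [] (· ++ [t]))
      PySem.Dict.empty).keys.Nodup :=
    PySem.Dict.nodup_keys_foldl_modify_key tickets pvBucket [] (fun _ t => (· ++ [t]))
      PySem.Dict.empty PySem.Dict.nodup_keys_empty
  rw [PySem.Dict.items_eq_map_keys _ hnd []]
  rw [PySem.Dict.keys_foldl_modify_key]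
  have hkeys : PySem.Set.update (PySem.Dict.empty
        (κ := String) (ν := List (List (String × Option String)))).keys (tickets.map pvBucket)
      = PySem.List.dedup (tickets.map pvBucket) := by
    simp [PySem.Dict.keys_empty, PySem.Set.update_nil_left]
  rw [hkeys]
  refine List.map_congr_left (fun k _ => ?_)
  have hfold : tickets.foldl (fun d t => d.modify (pvBucket t) [] (· ++ [t])) PySem.Dict.empty
      = (tickets.map (fun t => (pvBucket t, t))).foldl
          (fun d p => d.modify p.1 [] (· ++ [p.2])) PySem.Dict.empty := by
    rw [List.foldl_map]
  rw [hfold, PySem.Dict.getD_foldl_modify_append]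
  simp [PySem.Dict.getD_empty, List.filter_map, Function.comp_def]

-- ===== VERDICT (by name: the statement is the Claim_ definition above) =====
theorem bucket_tickets_per_description_status_py_spec : Claim_equal_bucket_tickets_per_description_status_py := by
  intro tickets _ _
  exact pvMain tickets
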